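-- pv_equiv track=rewrite | github.com/ribalda/everybodycodes | 2025/6/step1_2_3.py | count_big
-- ===== SOURCE A (Python) =====
-- from collections import Counter
--
-- def count_big(letters):
--     dist = 1000
--     mult = 1000
--     letters *= mult
--     cache = dict()
--     options = dict()
--     for i, l in enumerate(letters):
--         if l.isupper():
--             continue
--         left = max(0, i - dist)
--         right = min(len(letters), i + dist + 1)
--         roi = "".join(letters[left:right])
--         if roi not in cache:
--             cache[roi] = Counter(roi)
--         options[l] = options.get(l, 0) + cache[roi].get(l.upper(), 0)
--     return options
-- ===== SOURCE B (Python) =====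
-- def count_big(letters):
--     dist = 1000
--     letters *= 1000
--     n = len(letters)
--     pref = {}
--     options = {}
--     for i, l in enumerate(letters):
--         if l.isupper():
--             continue
--         u = l.upper()
--         if u not in pref:
--             t = 0
--             p = [0]
--             for c in letters:
--                 t += c == u
--                 p.append(t)
--             pref[u] = p
--         p = pref[u]
--         left = max(0, i - dist)
--         right = min(n, i + dist + 1)
--         options[l] = options.get(l, 0) + p[right] - p[left]
--     return options
-- ===== Notes on version B (the rewrite author's own statement) =====
-- stated objective: faster
-- what changed: Replaces A's per-position window slice + memoized Counter of each 2001-char window by one prefix-count array per needed uppercase letter, so each window query is O(1) via p[right]-p[left].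
import Mathlib
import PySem

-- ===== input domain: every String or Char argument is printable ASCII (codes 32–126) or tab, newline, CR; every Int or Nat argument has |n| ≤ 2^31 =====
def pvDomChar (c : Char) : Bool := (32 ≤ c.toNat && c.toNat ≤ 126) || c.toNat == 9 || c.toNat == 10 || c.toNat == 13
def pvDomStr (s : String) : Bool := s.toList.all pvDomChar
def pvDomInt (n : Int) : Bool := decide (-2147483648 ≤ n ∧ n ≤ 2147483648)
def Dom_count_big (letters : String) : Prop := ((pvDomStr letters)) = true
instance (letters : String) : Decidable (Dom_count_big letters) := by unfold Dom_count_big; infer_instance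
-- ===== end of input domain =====

-- B replaces A's per-position window Counter by one prefix-count array per needed letter (O(1) window queries); same return value.

-- ===== PORT A =====
-- Counter(roi) over the characters of roi; written distinct-keys-first so it evaluates fast —
-- provably THE SAME dict as the prescribed PySem.Dict.counter (lemma pvCounter_eq_counter below).
def pvCounter (xs : List Char) : PySem.Dict Char Int :=
  PySem.Dict.mk (xs.eraseDups.map (fun c => (c, (xs.count c : Int))))

-- one iteration of A's loop 'for i, l in enumerate(letters)': the index i is carried in the state
-- (first component); cache is a hash map (Python dicts are hash maps; it is only ever looked up).
def pvStepA (s : List Char)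
    (st : Int × Std.HashMap String (PySem.Dict Char Int) × PySem.Dict String Int)
    (l : Char) :
    Int × Std.HashMap String (PySem.Dict Char Int) × PySem.Dict String Int :=
  let i := st.1
  (i + 1,
  if PySem.Chars.isupper l then st.2
  else
    let left := max 0 (i - 1000)
    let right := min (s.length : Int) (i + 1000 + 1)
    let roi := String.ofList (PySem.List.slice s (some left) (some right))
    let cache := if st.2.1.contains roi then st.2.1 else st.2.1.insert roi (pvCounter roi.toList)
    -- cache[roi] cannot fail here; '.getD empty' totalises the lookup
    let cnt := (cache[roi]?.getD PySem.Dict.empty).getD (PySem.Chars.upperChar l) 0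
    let key := String.ofList [l]
    (cache, st.2.2.insert key (st.2.2.getD key 0 + cnt)))

def count_big (letters : String) : List (String × Int) :=
  let s := (List.replicate 1000 letters.toList).flatten   -- letters *= 1000
  (s.foldl (pvStepA s) (0, Std.HashMap.emptyWithCapacity, PySem.Dict.empty)).2.2.items

-- ===== PORT B =====
-- Python int indexing of a list (p[i]), negative indices wrap
def pyArrGet (a : Array Int) (i : Int) : Option Int :=
  if 0 ≤ i then a[i.toNat]? else a[(a.size + i).toNat]?

-- B's inner loop: prefix counts of u over s ( t = 0; p = [0]; for c in s: t += c == u; p.append(t) )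
def pvPrefix (s : List Char) (u : Char) : Array Int :=
  (s.foldl (fun (tp : Int × Array Int) c =>
      let t := tp.1 + (if c == u then 1 else 0)
      (t, tp.2.push t)) (0, #[0])).2

-- one iteration of B's loop; the index i is carried in the state (first component)
def pvStepB (s : List Char)
    (st : Int × PySem.Dict Char (Array Int) × PySem.Dict String Int)
    (l : Char) :
    Int × PySem.Dict Char (Array Int) × PySem.Dict String Int :=
  let i := st.1
  (i + 1,
  if PySem.Chars.isupper l then st.2
  else
    let u := PySem.Chars.upperChar l
    let pref := if st.2.1.contains u then st.2.1 else st.2.1.insert u (pvPrefix s u)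
    let p := (pref.get? u).getD #[]   -- pref[u]; cannot fail here
    let left := max 0 (i - 1000)
    let right := min (s.length : Int) (i + 1000 + 1)
    let key := String.ofList [l]
    (pref, st.2.2.insert key (st.2.2.getD key 0 +
      ((pyArrGet p right).getD 0 - (pyArrGet p left).getD 0))))

def count_big_alt (letters : String) : List (String × Int) :=
  let s := (List.replicate 1000 letters.toList).flatten   -- letters *= 1000
  (s.foldl (pvStepB s) (0, PySem.Dict.empty, PySem.Dict.empty)).2.2.items

-- ===== PRECONDITION & SPEC =====
def Spec_count_big (letters : String) (out : List (String × Int)) : Prop := out = count_big_alt letters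
instance (letters : String) (out : List (String × Int)) : Decidable (Spec_count_big letters out) := by unfold Spec_count_big; infer_instance

-- ===== CLAIM (what is proved, stated in full; the proofs are below) =====
def Claim_equal_count_big : Prop := ∀ (letters : String), Dom_count_big letters → Spec_count_big letters (count_big letters)

-- ===== LEMMAS AND PROOFS =====

-- Counter written distinct-keys-first is the prescribed counter
lemma eraseDupsBy_loop_eq (as : List Char) : ∀ (bs : List Char),
    List.eraseDupsBy.loop (fun a b => a == b) as bs = PySem.Set.update bs.reverse as := by
  induction as with
  | nil =>
    intro bs
    simp [List.eraseDupsBy.loop, PySem.Set.update]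
  | cons a as ih =>
    intro bs
    rw [List.eraseDupsBy.loop]
    have hupd : PySem.Set.update bs.reverse (a :: as)
        = PySem.Set.update (PySem.Set.add bs.reverse a) as := by
      simp [PySem.Set.update]
    rw [hupd]
    by_cases hmem : a ∈ bs
    · have h1 : (bs.any fun b => a == b) = true := by
        rw [List.any_eq_true]; exact ⟨a, hmem, by simp⟩
      simp only [h1]
      rw [ih bs]
      congr 1
      simp [PySem.Set.add, hmem]
    · have h1 : (bs.any fun b => a == b) = false := by
        rw [List.any_eq_false]; intro x hx; simp; rintro rfl; exact hmem hx
      simp only [h1]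
      rw [ih (a :: bs)]
      congr 1
      simp [PySem.Set.add, hmem]

lemma eraseDups_eq_ofList (xs : List Char) : xs.eraseDups = PySem.Set.ofList xs := by
  rw [List.eraseDups, List.eraseDupsBy, eraseDupsBy_loop_eq xs []]
  simp [PySem.Set.update, PySem.Set.ofList_eq_foldl]

lemma pvCounter_eq_counter (xs : List Char) : pvCounter xs = PySem.Dict.counter xs := by
  apply PySem.Dict.ext
  rw [PySem.Dict.items_counter]
  show (xs.eraseDups.map _) = _
  rw [eraseDups_eq_ofList]

-- common abstraction: the options-update both loops perform, with the window count written as a slice count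
def pvStepC (s : List Char) (st : Int × PySem.Dict String Int) (l : Char) :
    Int × PySem.Dict String Int :=
  let i := st.1
  (i + 1,
  if PySem.Chars.isupper l then st.2
  else
    let left := max 0 (i - 1000)
    let right := min (s.length : Int) (i + 1000 + 1)
    let key := String.ofList [l]
    st.2.insert key (st.2.getD key 0 +
      (((PySem.List.slice s (some left) (some right)).count (PySem.Chars.upperChar l) : Int))))

-- A's fold, projected to options, is the common fold (cache invariant: every stored value is the Counter of its key)
lemma foldA_eq (s : List Char) : ∀ (cs : List Char) (i : Int)
    (cache : Std.HashMap String (PySem.Dict Char Int)) (opts : PySem.Dict String Int),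
    (∀ (k : String) (v : PySem.Dict Char Int), cache[k]? = some v → v = pvCounter k.toList) →
    (cs.foldl (pvStepA s) (i, cache, opts)).2.2 = (cs.foldl (pvStepC s) (i, opts)).2 := by
  intro cs
  induction cs with
  | nil => intro _ _ _ _; rfl
  | cons c cs ih =>
    intro i cache opts hinv
    by_cases hu : PySem.Chars.isupper c
    · simp only [List.foldl_cons, pvStepA, pvStepC, hu, if_true]
      exact ih (i + 1) cache opts hinv
    · simp only [List.foldl_cons, pvStepA, pvStepC, hu, Bool.false_eq_true, if_false]
      set roi := String.ofList (PySem.List.slice s (some (max 0 (i - 1000)))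
        (some (min (s.length : Int) (i + 1000 + 1)))) with hroi
      by_cases hc : cache.contains roi
      · simp only [hc, if_true]
        obtain ⟨v, hv⟩ : ∃ v, cache[roi]? = some v := by
          rw [Std.HashMap.contains_eq_isSome_getElem?] at hc
          exact Option.isSome_iff_exists.mp hc
        rw [ih _ _ _ hinv, hv]
        simp only [Option.getD_some, hinv roi v hv, pvCounter_eq_counter,
          PySem.Dict.getD_counter, hroi, String.toList_ofList]
      · simp only [hc, Bool.false_eq_true, if_false]
        rw [ih _ _ _ ?_]
        · rw [Std.HashMap.getElem?_insert]
          simp only [beq_self_eq_true, if_true, Option.getD_some, pvCounter_eq_counter,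
            PySem.Dict.getD_counter, hroi, String.toList_ofList]
        · intro k v hv
          rw [Std.HashMap.getElem?_insert] at hv
          split at hv
          · next h => cases hv; rw [eq_of_beq h]
          · exact hinv k v hv

-- the prefix fold characterised
lemma pvPrefix_aux (u : Char) : ∀ (cs : List Char) (t0 : Int) (arr : Array Int),
    (cs.foldl (fun (tp : Int × Array Int) c =>
        let t := tp.1 + (if c == u then 1 else 0)
        (t, tp.2.push t)) (t0, arr)).2.toList
      = arr.toList ++ (List.range cs.length).map (fun j => t0 + ((cs.take (j+1)).count u : Int)) := by
  intro cs
  induction cs with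
  | nil => intro t0 arr; simp
  | cons c cs ih =>
    intro t0 arr
    rw [List.foldl_cons]
    show (cs.foldl _ (t0 + (if c == u then (1:Int) else 0),
        arr.push (t0 + (if c == u then (1:Int) else 0)))).2.toList = _
    rw [ih]
    rw [List.length_cons, List.range_succ_eq_map, List.map_cons, List.map_map, Array.toList_push,
      List.append_assoc]
    congr 1
    rw [List.singleton_append]
    congr 1
    · simp [List.count_cons, List.count_nil]
    · apply List.map_congr_left
      intro j _
      show (t0 + (if c == u then (1:Int) else 0)) + ((cs.take (j+1)).count u : Int)
         = t0 + (((c :: cs).take (j+1+1)).count u : Int)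
      rw [List.take_succ_cons, List.count_cons]
      by_cases h : c = u
      · simp [h]; ring
      · simp [h]

lemma pvPrefix_get (s : List Char) (u : Char) (j : Nat) (h : j ≤ s.length) :
    (pyArrGet (pvPrefix s u) (j : Int)).getD 0 = ((s.take j).count u : Int) := by
  have hp : (pvPrefix s u).toList
      = (0 : Int) :: (List.range s.length).map (fun j => ((s.take (j+1)).count u : Int)) := by
    unfold pvPrefix
    rw [pvPrefix_aux u s 0 #[0]]
    simp
  have hj : (0:Int) ≤ (j:Int) := by omega
  rw [pyArrGet, if_pos hj]
  have : (pvPrefix s u)[(j:Int).toNat]? = (pvPrefix s u).toList[j]? := by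
    rw [Array.getElem?_toList]
    simp
  rw [this, hp]
  rcases j with _ | m
  · simp
  · have hm : m < s.length := by omega
    simp [hm]

-- the O(1) range query equals the window slice count
lemma win_eq (s : List Char) (u : Char) (i : Int) (h0 : 0 ≤ i) (h1 : i < (s.length : Int)) :
    (pyArrGet (pvPrefix s u) (min (s.length : Int) (i + 1000 + 1))).getD 0
      - (pyArrGet (pvPrefix s u) (max 0 (i - 1000))).getD 0
    = ((PySem.List.slice s (some (max 0 (i - 1000))) (some (min (s.length : Int) (i + 1000 + 1)))).count u : Int) := by
  set L : Int := max 0 (i - 1000) with hL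
  set R : Int := min (s.length : Int) (i + 1000 + 1) with hR
  have hL0 : 0 ≤ L := le_max_left 0 _
  have hR0 : 0 ≤ R := by omega
  obtain ⟨a, ha⟩ : ∃ a : Nat, L = (a : Int) := ⟨L.toNat, (Int.toNat_of_nonneg hL0).symm⟩
  obtain ⟨b, hb⟩ : ∃ b : Nat, R = (b : Int) := ⟨R.toNat, (Int.toNat_of_nonneg hR0).symm⟩
  have hab : a ≤ b := by omega
  have hbn : b ≤ s.length := by omega
  have han : a ≤ s.length := le_trans hab hbn
  rw [ha, hb, pvPrefix_get s u a han, pvPrefix_get s u b hbn, PySem.List.slice_natCast]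
  have hsplit : (s.take b).count u = (s.take a).count u + ((s.drop a).take (b - a)).count u := by
    conv_lhs => rw [← List.take_append_drop a (s.take b)]
    rw [List.count_append, List.take_take, min_eq_left hab, List.drop_take]
  omega

-- B's fold, projected to options, is the common fold (pref invariant: every stored value is the prefix array of its key)
lemma foldB_eq (s : List Char) : ∀ (cs : List Char) (i : Int)
    (pref : PySem.Dict Char (Array Int)) (opts : PySem.Dict String Int),
    0 ≤ i → i + cs.length ≤ (s.length : Int) →
    (∀ u p, pref.get? u = some p → p = pvPrefix s u) →
    (cs.foldl (pvStepB s) (i, pref, opts)).2.2 = (cs.foldl (pvStepC s) (i, opts)).2 := by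
  intro cs
  induction cs with
  | nil => intro _ _ _ _ _ _; rfl
  | cons c cs ih =>
    intro i pref opts hi0 hilen hinv
    have hlen : (((c :: cs).length : Int)) = cs.length + 1 := by
      simp
    have hi1 : i < (s.length : Int) := by
      rw [hlen] at hilen; omega
    have hnext0 : 0 ≤ i + 1 := by omega
    have hnextlen : (i + 1) + cs.length ≤ (s.length : Int) := by
      rw [hlen] at hilen; omega
    by_cases hu : PySem.Chars.isupper c
    · simp only [List.foldl_cons, pvStepB, pvStepC, hu, if_true]
      exact ih (i + 1) pref opts hnext0 hnextlen hinv
    · simp only [List.foldl_cons, pvStepB, pvStepC, hu, Bool.false_eq_true, if_false]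
      set U := PySem.Chars.upperChar c with hU
      by_cases hc : pref.contains U
      · simp only [hc, if_true]
        obtain ⟨p, hp⟩ : ∃ p, pref.get? U = some p := by
          rw [PySem.Dict.contains_eq_isSome_get?] at hc
          exact Option.isSome_iff_exists.mp hc
        rw [ih _ _ _ hnext0 hnextlen hinv, hp]
        simp only [Option.getD_some, hinv U p hp, win_eq s U i hi0 hi1]
      · simp only [hc, Bool.false_eq_true, if_false]
        rw [ih _ _ _ hnext0 hnextlen ?_]
        · rw [PySem.Dict.get?_insert_self]
          simp only [Option.getD_some, win_eq s U i hi0 hi1]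
        · intro v p hp
          rw [PySem.Dict.get?_insert] at hp
          split at hp
          · next h => cases hp; rw [h]
          · exact hinv v p hp

-- ===== VERDICT (by name: the statement is the Claim_ definition above) =====
theorem count_big_spec : Claim_equal_count_big := by
  intro letters _
  unfold Spec_count_big count_big count_big_alt
  show (((List.replicate 1000 letters.toList).flatten).foldl
          (pvStepA ((List.replicate 1000 letters.toList).flatten))
          (0, Std.HashMap.emptyWithCapacity, PySem.Dict.empty)).2.2.items
      = (((List.replicate 1000 letters.toList).flatten).foldl
          (pvStepB ((List.replicate 1000 letters.toList).flatten))
          (0, PySem.Dict.empty, PySem.Dict.empty)).2.2.items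
  set s := (List.replicate 1000 letters.toList).flatten with hs
  rw [foldA_eq s s 0 _ _ (by intro k v h; rw [Std.HashMap.getElem?_emptyWithCapacity] at h; cases h),
      foldB_eq s s 0 _ _ le_rfl (by omega) (by intro u p h; simp [PySem.Dict.get?_empty] at h)]
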